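-- pv_equiv track=rewrite | github.com/tgeconf/AI-Trader | market_regime/trend_analyzer.py | compute_duration
-- ===== SOURCE A (Python) =====
-- from enum import Enum
-- from typing import Dict, List, Optional, Sequence
--
-- class TrendRegime(Enum):
--     """趋势状态枚举"""
--     UPTREND = "uptrend"
--     DOWNTREND = "downtrend"
--     SIDEWAYS = "sideways"
--     TREND_REVERSAL = "reversal"
--
-- def compute_duration(regime_series: Sequence[TrendRegime]) -> int:
--     if not regime_series:
--         return 0
--     count = 0
--     last_regime = regime_series[-1]
--     for regime in reversed(regime_series):
--         if regime == last_regime: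
--             count += 1
--         else:
--             break
--     return count
-- ===== SOURCE B (Python) =====
-- def compute_duration(regime_series):
--     # Forward one-pass run grouping: keep only the most recent run's
--     # (key, count); the final count is the trailing run length.
--     cur = object()  # sentinel equal to nothing
--     count = 0
--     for regime in regime_series:
--         if regime == cur:
--             count += 1
--         else:
--             cur, count = regime, 1
--     return count
-- ===== Notes on version B (the rewrite author's own statement) =====
-- stated objective: alternative
-- what changed: B replaces A's backward scan with an early break by a single forward pass that maintains (current run key, current run count), so the state left at the end is the trailing run length.
import Mathlib
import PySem

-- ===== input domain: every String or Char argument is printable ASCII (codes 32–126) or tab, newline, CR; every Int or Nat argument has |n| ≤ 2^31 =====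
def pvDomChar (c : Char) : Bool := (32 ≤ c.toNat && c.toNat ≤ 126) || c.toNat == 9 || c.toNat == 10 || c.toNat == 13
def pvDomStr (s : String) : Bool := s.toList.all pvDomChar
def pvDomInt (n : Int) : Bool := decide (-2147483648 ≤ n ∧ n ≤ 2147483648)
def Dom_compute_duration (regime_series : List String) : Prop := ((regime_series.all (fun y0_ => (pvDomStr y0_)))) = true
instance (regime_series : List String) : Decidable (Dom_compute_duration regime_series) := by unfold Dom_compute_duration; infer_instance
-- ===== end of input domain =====

-- A = backward scan with early break; B = forward run-grouping fold keeping the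
-- most recent run's key and count (alternative decomposition, same exact values).
-- ===== PORT A =====
-- the 'for … reversed' loop with its break: count while equal, stop at first mismatch
def cdLoop : List String → String → Int → Int
  | [], _, count => count
  | regime :: rest, last_regime, count =>
      if regime == last_regime then cdLoop rest last_regime (count + 1) else count

def compute_duration (regime_series : List String) : Int :=
  if regime_series = [] then 0
  else
    let last_regime := PySem.List.pyGetD regime_series (-1) ""   -- regime_series[-1]; in range: list nonempty
    cdLoop regime_series.reverse last_regime 0

-- ===== PORT B =====
-- state = (current run key (None before the first element), current run count)
def cdStep (s : Option String × Int) (regime : String) : Option String × Int :=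
  match s with
  | (some cur, count) => if regime == cur then (some cur, count + 1) else (some regime, 1)
  | (none, _) => (some regime, 1)

def compute_duration_alt (regime_series : List String) : Int :=
  (regime_series.foldl cdStep (none, 0)).2

-- ===== PRECONDITION & SPEC =====
def Spec_compute_duration (regime_series : List String) (out : Int) : Prop := out = compute_duration_alt regime_series
instance (regime_series : List String) (out : Int) : Decidable (Spec_compute_duration regime_series out) := by unfold Spec_compute_duration; infer_instance

-- ===== CLAIM (what is proved, stated in full; the proofs are below) =====
def Claim_equal_compute_duration : Prop := ∀ (regime_series : List String), Dom_compute_duration regime_series → Spec_compute_duration regime_series (compute_duration regime_series)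

-- ===== LEMMAS AND PROOFS =====

-- ===== VERDICT (by name: the statement is the Claim_ definition above) =====
-- cdLoop's accumulator is additive
theorem cdLoop_add (xs : List String) (last : String) (c : Int) :
    cdLoop xs last c = c + cdLoop xs last 0 := by
  induction xs generalizing c with
  | nil => simp [cdLoop]
  | cons x xs ih =>
      by_cases h : x == last
      · simp [cdLoop, h]; rw [ih (c + 1), ih 1]; ring
      · simp [cdLoop, h]

-- B's fold over r.reverse ends in (head of r, A's backward count over r)
theorem fold_inv (r : List String) (h : r ≠ []) :
    r.reverse.foldl cdStep (none, 0) = (some (r.head h), cdLoop r (r.head h) 0) := by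
  induction r with
  | nil => simp at h
  | cons x r' ih =>
      simp only [List.reverse_cons, List.foldl_append, List.foldl_cons, List.foldl_nil]
      cases r' with
      | nil => simp [cdStep, cdLoop]
      | cons y t =>
          rw [ih (by simp)]
          by_cases hxy : x == y
          · have hxy' : x = y := by simpa using hxy
            simp [cdStep, cdLoop, hxy', List.head]
            rw [cdLoop_add t y 1, cdLoop_add t y 2]
            ring
          · have hyx : (y == x) = false := by
              simp at hxy ⊢; exact fun e => hxy e.symm
            simp [cdStep, cdLoop, hxy, hyx, List.head]

theorem compute_duration_spec : Claim_equal_compute_duration := by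
  intro regime_series _
  unfold Spec_compute_duration compute_duration compute_duration_alt
  by_cases h : regime_series = []
  · simp [h]
  · have hrev : regime_series.reverse ≠ [] := by simpa using h
    rw [if_neg h, PySem.List.pyGetD_neg_one regime_series "" h]
    have hfold := fold_inv regime_series.reverse hrev
    rw [List.reverse_reverse] at hfold
    rw [hfold]
    show cdLoop regime_series.reverse (regime_series.getLast h) 0 =
        cdLoop regime_series.reverse (regime_series.reverse.head hrev) 0
    rw [List.head_reverse hrev]
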